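-- pv_equiv track=rewrite | github.com/artjom3729/Programmeerimise-advendikalender | 10. detsember.py | generate_orientations
-- ===== SOURCE A (Python) =====
-- def generate_orientations(blocks):
--     orientations = []
--     for l, w, h in blocks:
--         orientations.append((l, w, h))
--         orientations.append((l, h, w))
--         orientations.append((w, l, h))
--         orientations.append((w, h, l))
--         orientations.append((h, l, w))
--         orientations.append((h, w, l))
--     return orientations
-- ===== SOURCE B (Python) =====
-- def _perms(xs):
--     # recursive permutation generation in lexicographic position order
--     if len(xs) == 1:
--         return [xs]
--     return [(xs[i],) + p for i in range(len(xs)) for p in _perms(xs[:i] + xs[i + 1:])]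
--
-- def generate_orientations(blocks):
--     orientations = []
--     for block in blocks:
--         orientations.extend(_perms(block))
--     return orientations
-- ===== Notes on version B (the rewrite author's own statement) =====
-- stated objective: alternative
-- what changed: Replaces the six hard-coded append calls per block with a recursive permutation generator (_perms) that builds all orderings algorithmically in the same positional order.
import Mathlib
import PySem

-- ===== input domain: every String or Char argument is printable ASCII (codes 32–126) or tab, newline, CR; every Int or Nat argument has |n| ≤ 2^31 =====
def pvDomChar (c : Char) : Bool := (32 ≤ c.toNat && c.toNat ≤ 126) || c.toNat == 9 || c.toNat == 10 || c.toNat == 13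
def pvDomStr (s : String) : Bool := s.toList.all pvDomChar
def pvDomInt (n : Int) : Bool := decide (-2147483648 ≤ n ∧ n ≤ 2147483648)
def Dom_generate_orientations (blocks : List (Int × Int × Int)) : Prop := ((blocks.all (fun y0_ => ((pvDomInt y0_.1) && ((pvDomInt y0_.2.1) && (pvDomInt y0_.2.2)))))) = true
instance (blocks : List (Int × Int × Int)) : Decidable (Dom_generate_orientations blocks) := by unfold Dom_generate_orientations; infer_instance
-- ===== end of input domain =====

-- B replaces A's six hard-coded appends per block with a recursive permutation generator (alternative decomposition; same cost).

-- ===== PORT A =====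
-- Literal port of A: one loop, six appends per block.
def generate_orientations (blocks : List (Int × Int × Int)) : List (Int × Int × Int) :=
  blocks.foldl (fun orientations b =>
    match b with
    | (l, w, h) =>
      ((((((orientations ++ [(l, w, h)]) ++ [(l, h, w)]) ++ [(w, l, h)]) ++ [(w, h, l)])
        ++ [(h, l, w)]) ++ [(h, w, l)])) []

-- ===== PORT B =====
-- B (simpler/idiomatic): orientations generated by a recursive permutation routine
-- (Python tuples become lists here, converted back to triples).
def permsB (xs : List Int) : List (List Int) :=
  if xs.length = 1 then [xs]
  else (List.range xs.length).attach.flatMap (fun i =>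
    (permsB (xs.take i.1 ++ xs.drop (i.1 + 1))).map (fun p => xs.getD i.1 0 :: p))
termination_by xs.length
decreasing_by
  have hi := i.2; simp [List.mem_range] at hi
  simp [List.length_take, List.length_drop]; omega

def tripleOfB : List Int → Int × Int × Int
  | [a, b, c] => (a, b, c)
  | _ => (0, 0, 0)

def generate_orientations_alt (blocks : List (Int × Int × Int)) : List (Int × Int × Int) :=
  blocks.foldl (fun orientations b =>
    orientations ++ (permsB [b.1, b.2.1, b.2.2]).map tripleOfB) []

-- ===== PRECONDITION & SPEC =====
def Spec_generate_orientations (blocks : List (Int × Int × Int)) (out : List (Int × Int × Int)) : Prop := out = generate_orientations_alt blocks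
instance (blocks : List (Int × Int × Int)) (out : List (Int × Int × Int)) : Decidable (Spec_generate_orientations blocks out) := by unfold Spec_generate_orientations; infer_instance

-- ===== CLAIM (what is proved, stated in full; the proofs are below) =====
def Claim_equal_generate_orientations : Prop := ∀ (blocks : List (Int × Int × Int)), Dom_generate_orientations blocks → Spec_generate_orientations blocks (generate_orientations blocks)

-- ===== LEMMAS AND PROOFS =====

lemma permsB_one (a : Int) : permsB [a] = [[a]] := by
  simp [permsB]

lemma permsB_two (a b : Int) : permsB [a, b] = [[a, b], [b, a]] := by
  rw [permsB]
  simp [List.range_succ, List.attach, List.attachWith, permsB_one]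

lemma permsB_three (a b c : Int) :
    permsB [a, b, c] = [[a, b, c], [a, c, b], [b, a, c], [b, c, a], [c, a, b], [c, b, a]] := by
  rw [permsB]
  simp [List.range_succ, List.attach, List.attachWith, permsB_two]

lemma step_eq (acc : List (Int × Int × Int)) (blocks : List (Int × Int × Int)) :
    blocks.foldl (fun orientations b =>
      match b with
      | (l, w, h) =>
        ((((((orientations ++ [(l, w, h)]) ++ [(l, h, w)]) ++ [(w, l, h)]) ++ [(w, h, l)])
          ++ [(h, l, w)]) ++ [(h, w, l)])) acc
    = blocks.foldl (fun orientations b =>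
        orientations ++ (permsB [b.1, b.2.1, b.2.2]).map tripleOfB) acc := by
  induction blocks generalizing acc with
  | nil => rfl
  | cons b rest ih =>
    obtain ⟨l, w, h⟩ := b
    simp only [List.foldl_cons]
    rw [ih]
    have hacc : ((((((acc ++ [(l, w, h)]) ++ [(l, h, w)]) ++ [(w, l, h)]) ++ [(w, h, l)])
        ++ [(h, l, w)]) ++ [(h, w, l)])
        = acc ++ (permsB [l, w, h]).map tripleOfB := by
      simp [permsB_three, tripleOfB]
    rw [hacc]

-- ===== VERDICT (by name: the statement is the Claim_ definition above) =====
theorem generate_orientations_spec : Claim_equal_generate_orientations := by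
  intro blocks _
  unfold Spec_generate_orientations generate_orientations generate_orientations_alt
  exact step_eq [] blocks
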